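-- pv_equiv track=rewrite | github.com/vision-dev1/BrowserSpy | utils/suspicious.py | flag_suspicious_url
-- ===== SOURCE A (Python) =====
-- def flag_suspicious_url(url: str) -> bool:
--     """
--     Check whether a URL contains patterns commonly associated with phishing or malware.
--
--     Args:
--         url: URL string to evaluate.
--
--     Returns:
--         True if the URL looks suspicious.
--     """
--     lowered = url.lower()
--     suspicious_patterns = [
--         "login-secure",
--         "account-verify",
--         "verify-account",
--         "update-billing",
--         "confirm-identity",
--         ".ru/",
--         ".cn/",
--         "bit.ly",
--         "tinyurl",
--         "goo.gl",
--         "ow.ly",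
--         "t.co",
--         "phish",
--         "malware",
--         "ransomware",
--     ]
--     return any(p in lowered for p in suspicious_patterns)
-- ===== SOURCE B (Python) =====
-- _PATTERNS = (
--     "login-secure",
--     "account-verify",
--     "verify-account",
--     "update-billing",
--     "confirm-identity",
--     ".ru/",
--     ".cn/",
--     "bit.ly",
--     "tinyurl",
--     "goo.gl",
--     "ow.ly",
--     "t.co",
--     "phish",
--     "malware",
--     "ransomware",
-- )
--
--
-- def flag_suspicious_url(url: str) -> bool:
--     """Single left-to-right scan: at each position, test whether any
--     suspicious pattern starts there."""
--     lowered = url.lower()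
--     for i in range(len(lowered)):
--         for p in _PATTERNS:
--             if lowered.startswith(p, i):
--                 return True
--     return False
-- ===== Notes on version B (the rewrite author's own statement) =====
-- stated objective: alternative
-- what changed: B replaces A's pattern-outer loop of k independent full substring searches by a single position-outer left-to-right scan that tests at each index whether any pattern starts there, returning early on the first hit.
import Mathlib
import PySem

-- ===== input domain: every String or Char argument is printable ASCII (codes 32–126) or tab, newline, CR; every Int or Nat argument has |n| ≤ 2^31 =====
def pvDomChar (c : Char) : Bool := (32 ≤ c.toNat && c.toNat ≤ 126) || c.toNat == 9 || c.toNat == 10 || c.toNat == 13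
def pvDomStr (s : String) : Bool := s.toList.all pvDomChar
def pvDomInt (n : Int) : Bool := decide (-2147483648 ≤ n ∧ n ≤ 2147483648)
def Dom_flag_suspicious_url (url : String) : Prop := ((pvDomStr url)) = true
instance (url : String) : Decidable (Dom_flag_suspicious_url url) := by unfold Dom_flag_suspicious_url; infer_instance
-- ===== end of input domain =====

-- B changes the traversal: one left-to-right scan over positions testing every pattern there,
-- instead of A's k independent full substring searches; same result, no speed claim.

-- ===== PORT A =====
def flag_suspicious_url (url : String) : Bool :=
  let lowered := PySem.Str.lower url
  let suspicious_patterns : List String :=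
    ["login-secure", "account-verify", "verify-account", "update-billing",
     "confirm-identity", ".ru/", ".cn/", "bit.ly", "tinyurl", "goo.gl",
     "ow.ly", "t.co", "phish", "malware", "ransomware"]
  suspicious_patterns.any (fun p => PySem.Str.isIn p lowered)

-- ===== PORT B =====
def pvPatterns : List String :=
  ["login-secure", "account-verify", "verify-account", "update-billing",
   "confirm-identity", ".ru/", ".cn/", "bit.ly", "tinyurl", "goo.gl",
   "ow.ly", "t.co", "phish", "malware", "ransomware"]

def flag_suspicious_url_alt (url : String) : Bool :=
  let lowered := PySem.Str.lower url
  -- Python's lowered.startswith(p, i) for 0 ≤ i is exactly: p is a prefix of the chars from i on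
  (List.range lowered.toList.length).any (fun i =>
    pvPatterns.any (fun p => PySem.Chars.startswith (lowered.toList.drop i) p.toList))

-- ===== PRECONDITION & SPEC =====
def Spec_flag_suspicious_url (url : String) (out : Bool) : Prop := out = flag_suspicious_url_alt url
instance (url : String) (out : Bool) : Decidable (Spec_flag_suspicious_url url out) := by unfold Spec_flag_suspicious_url; infer_instance

-- ===== CLAIM (what is proved, stated in full; the proofs are below) =====
def Claim_equal_flag_suspicious_url : Prop := ∀ (url : String), Dom_flag_suspicious_url url → Spec_flag_suspicious_url url (flag_suspicious_url url)

-- ===== LEMMAS AND PROOFS =====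

-- a nonempty pattern is an infix iff it is a prefix of some proper drop
theorem pv_infix_iff_prefix_drop_lt {p cs : List Char} (hp : p ≠ []) :
    p <:+: cs ↔ ∃ i < cs.length, p <+: cs.drop i := by
  constructor
  · intro h
    rw [← PySem.Chars.isIn_iff_infix, ← PySem.Chars.exists_prefix_drop_iff_isIn] at h
    obtain ⟨j, hj⟩ := h
    by_cases hjl : j < cs.length
    · exact ⟨j, hjl, hj⟩
    · exfalso
      rw [List.drop_eq_nil_of_le (le_of_not_gt hjl), List.prefix_nil] at hj
      exact hp hj
  · rintro ⟨i, _, hpre⟩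
    exact hpre.isInfix.trans (List.drop_suffix i cs).isInfix

theorem pv_pattern_ne_nil {p : String} (h : p ∈ pvPatterns) : p.toList ≠ [] := by
  simp only [pvPatterns, List.mem_cons, List.not_mem_nil, or_false] at h
  rcases h with rfl|rfl|rfl|rfl|rfl|rfl|rfl|rfl|rfl|rfl|rfl|rfl|rfl|rfl|rfl <;> decide

-- ===== VERDICT (by name: the statement is the Claim_ definition above) =====
theorem flag_suspicious_url_spec : Claim_equal_flag_suspicious_url := by
  intro url _
  unfold Spec_flag_suspicious_url flag_suspicious_url flag_suspicious_url_alt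
  rw [Bool.eq_iff_iff]
  simp only [List.any_eq_true, PySem.Str.isIn_eq, PySem.Chars.isIn_iff_infix,
    PySem.Chars.startswith_iff, List.mem_range]
  constructor
  · rintro ⟨p, hp, hinf⟩
    obtain ⟨i, hi, hpre⟩ := (pv_infix_iff_prefix_drop_lt (pv_pattern_ne_nil hp)).mp hinf
    exact ⟨i, hi, p, hp, hpre⟩
  · rintro ⟨i, hi, p, hp, hpre⟩
    exact ⟨p, hp, (pv_infix_iff_prefix_drop_lt (pv_pattern_ne_nil hp)).mpr ⟨i, hi, hpre⟩⟩
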